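-- pv_equiv track=rewrite | github.com/sdrasco/freedact | src/redactor/preprocess/layout_reconstructor.py | build_line_index
-- ===== SOURCE A (Python) =====
-- LineIndex = tuple[tuple[int, int, str], ...]
--
-- def build_line_index(text: str) -> LineIndex:
--     """Return start/end offsets for each line in ``text``.
--
--     Each entry contains ``(line_start, line_end_no_eol, eol_str)``.  The end
--     offset excludes any trailing line ending characters.  ``eol_str`` is ``""``
--     when the line does not terminate with a newline sequence.
--     """
--
--     lines: list[tuple[int, int, str]] = []
--     i = 0
--     length = len(text)
--     while i < length:
--         line_start = i
--         while i < length and text[i] not in "\n\r":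
--             i += 1
--         line_end = i
--         eol = ""
--         if i < length:
--             ch = text[i]
--             if ch == "\r" and i + 1 < length and text[i + 1] == "\n":
--                 eol = "\r\n"
--                 i += 2
--             else:
--                 eol = ch
--                 i += 1
--         lines.append((line_start, line_end, eol))
--     return tuple(lines)
-- ===== SOURCE B (Python) =====
-- import re
--
-- _EOL = re.compile(r"\r\n|\r|\n")
--
-- def build_line_index(text: str):
--     entries = []
--     pos = 0
--     for m in _EOL.finditer(text):
--         entries.append((pos, m.start(), m.group()))
--         pos = m.end()
--     if pos < len(text):
--         entries.append((pos, len(text), ""))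
--     return tuple(entries)
-- ===== Notes on version B (the rewrite author's own statement) =====
-- stated objective: idiomatic
-- what changed: Replaces the hand-written index walk with nested while loops by a regex pass: re.finditer(r'\r\n|\r|\n') locates all line endings, then a single fold pairs each ending with the previous position, appending a final unterminated segment if any.
import Mathlib
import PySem

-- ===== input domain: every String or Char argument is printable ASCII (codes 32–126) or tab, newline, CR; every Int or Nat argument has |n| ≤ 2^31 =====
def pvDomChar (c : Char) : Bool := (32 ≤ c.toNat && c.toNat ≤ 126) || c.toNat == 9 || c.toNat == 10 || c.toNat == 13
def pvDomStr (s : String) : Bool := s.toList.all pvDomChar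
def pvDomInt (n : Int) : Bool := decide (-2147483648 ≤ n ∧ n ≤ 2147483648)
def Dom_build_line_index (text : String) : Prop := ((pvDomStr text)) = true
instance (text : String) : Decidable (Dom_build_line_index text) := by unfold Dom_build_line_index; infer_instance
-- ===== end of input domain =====

-- B replaces A's hand-written index walk (outer while over lines, inner while over chars)
-- by a regex-style pass: find all line-ending matches first, then pair each with the
-- previous position in one fold (objective: idiomatic; return value only, no mutation).

-- ===== PORT A =====
-- A's inner `while i < length and text[i] not in "\n\r"` loop: returns the number of
-- chars skipped and the remaining suffix.
def pvSkipA (cs : List Char) : Nat × List Char :=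
  match cs with
  | [] => (0, [])
  | c :: t =>
    if c = '\n' ∨ c = '\r' then (0, c :: t)
    else ((pvSkipA t).1 + 1, (pvSkipA t).2)

theorem pvSkipA_len (cs : List Char) : (pvSkipA cs).1 + (pvSkipA cs).2.length = cs.length := by
  induction cs with
  | nil => simp [pvSkipA]
  | cons c t ih =>
    by_cases h : c = '\n' ∨ c = '\r' <;> simp [pvSkipA, h] <;> omega

-- A's outer while loop.
def pvGoA (cs : List Char) (i : Int) : List (Int × Int × String) :=
  match cs with
  | [] => []
  | c :: t =>
    match hp : pvSkipA (c :: t) with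
    | (k, []) => [(i, i + (k : Int), "")]
    | (k, '\r' :: '\n' :: r) => (i, i + (k : Int), "\r\n") :: pvGoA r (i + k + 2)
    | (k, d :: r) => (i, i + (k : Int), String.mk [d]) :: pvGoA r (i + k + 1)
  termination_by cs.length
  decreasing_by
  · have := pvSkipA_len (c :: t); rw [hp] at this; simp at this ⊢; omega
  · have := pvSkipA_len (c :: t); rw [hp] at this; simp at this ⊢; omega

def build_line_index (text : String) : List (Int × Int × String) :=
  pvGoA text.toList 0

-- ===== PORT B =====
-- re.finditer(r"\r\n|\r|\n", text): all line-ending matches as (start, end, group),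
-- alternation tried in order at each position.
def pvFindEols (cs : List Char) (i : Int) : List (Int × Int × String) :=
  match cs with
  | [] => []
  | '\r' :: '\n' :: t => (i, i + 2, "\r\n") :: pvFindEols t (i + 2)
  | '\n' :: t => (i, i + 1, "\n") :: pvFindEols t (i + 1)
  | '\r' :: t => (i, i + 1, "\r") :: pvFindEols t (i + 1)
  | _ :: t => pvFindEols t (i + 1)

def build_line_index_alt (text : String) : List (Int × Int × String) :=
  let n : Int := (text.toList.length : Int)
  let ms := pvFindEols text.toList 0
  let st := ms.foldl (fun (st : List (Int × Int × String) × Int) m =>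
      (st.1 ++ [(st.2, m.1, m.2.2)], m.2.1)) ([], (0 : Int))
  if st.2 < n then st.1 ++ [(st.2, n, "")] else st.1

-- ===== PRECONDITION & SPEC =====
def Spec_build_line_index (text : String) (out : List (Int × Int × String)) : Prop := out = build_line_index_alt text
instance (text : String) (out : List (Int × Int × String)) : Decidable (Spec_build_line_index text out) := by unfold Spec_build_line_index; infer_instance

-- ===== CLAIM (what is proved, stated in full; the proofs are below) =====
def Claim_equal_build_line_index : Prop := ∀ (text : String), Dom_build_line_index text → Spec_build_line_index text (build_line_index text)

-- ===== LEMMAS AND PROOFS =====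

-- Recursive form of B's fold-and-final-segment assembly.
def pvAsm (ms : List (Int × Int × String)) (pos L : Int) : List (Int × Int × String) :=
  match ms with
  | [] => if pos < L then [(pos, L, "")] else []
  | (s, e, g) :: t => (pos, s, g) :: pvAsm t e L

theorem pvFold_asm (ms : List (Int × Int × String)) (acc : List (Int × Int × String))
    (pos L : Int) :
    (let st := ms.foldl (fun (st : List (Int × Int × String) × Int) m =>
        (st.1 ++ [(st.2, m.1, m.2.2)], m.2.1)) (acc, pos);
     if st.2 < L then st.1 ++ [(st.2, L, "")] else st.1) = acc ++ pvAsm ms pos L := by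
  induction ms generalizing acc pos with
  | nil => simp only [List.foldl, pvAsm]; split <;> simp
  | cons m t ih =>
    obtain ⟨s, e, g⟩ := m
    simpa [pvAsm] using ih (acc ++ [(pos, s, g)]) e

theorem pvSkipA_head (cs : List Char) (d : Char) (r : List Char)
    (h : (pvSkipA cs).2 = d :: r) : d = '\n' ∨ d = '\r' := by
  induction cs with
  | nil => simp [pvSkipA] at h
  | cons c t ih =>
    by_cases hc : c = '\n' ∨ c = '\r'
    · simp only [pvSkipA, if_pos hc] at h
      simp at h
      exact h.1 ▸ hc
    · simp only [pvSkipA, if_neg hc] at h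
      exact ih h

theorem pvSkipA_find (cs : List Char) (i : Int) :
    pvFindEols cs i = pvFindEols (pvSkipA cs).2 (i + ((pvSkipA cs).1 : Int)) := by
  induction cs generalizing i with
  | nil => simp [pvSkipA]
  | cons c t ih =>
    by_cases hc : c = '\n' ∨ c = '\r'
    · simp [pvSkipA, hc]
    · push_neg at hc
      have hstep : pvFindEols (c :: t) i = pvFindEols t (i + 1) := by
        rw [pvFindEols.eq_def]
        split
        · simp_all
        · simp_all
        · simp_all
        · rename_i heq
          injection heq with h1 h2
          exact absurd h1 hc.2
        · rename_i heq
          injection heq with h1 h2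
          rw [← h2]
      rw [hstep, ih]
      simp only [pvSkipA, if_neg (by tauto : ¬(c = '\n' ∨ c = '\r'))]
      congr 1
      push_cast
      ring

-- main equivalence between A's loop and B's match-then-assemble
theorem pvMain (n : Nat) : ∀ (cs : List Char) (i : Int), cs.length ≤ n →
    pvGoA cs i = pvAsm (pvFindEols cs i) i (i + (cs.length : Int)) := by
  induction n with
  | zero =>
    intro cs i h
    have : cs = [] := List.length_eq_zero_iff.mp (Nat.le_zero.mp h)
    subst this
    simp [pvGoA, pvFindEols, pvAsm]
  | succ n ih =>
    intro cs i h
    cases cs with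
    | nil => simp [pvGoA, pvFindEols, pvAsm]
    | cons c t =>
      simp only [List.length_cons] at h
      have hlen0 := pvSkipA_len (c :: t)
      have hfind0 := pvSkipA_find (c :: t) i
      rw [pvGoA.eq_def]
      split
      · rename_i heq
        exact absurd heq (by simp)
      rename_i c' t' heq0
      injection heq0 with e1 e2
      subst e1; subst e2
      split
      · -- rest = []
        rename_i k heq
        rw [heq] at hlen0 hfind0
        simp at hlen0
        simp [pvFindEols] at hfind0
        rw [hfind0]
        simp only [pvAsm, List.length_cons]
        rw [if_pos (by push_cast; omega)]
        have : (k : Int) = ((t.length + 1 : Nat) : Int) := by push_cast; omega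
        rw [this]
      · -- rest = '\r' :: '\n' :: r
        rename_i k r heq
        rw [heq] at hlen0 hfind0
        simp at hlen0
        rw [hfind0]
        simp only [pvFindEols, pvAsm, List.length_cons]
        have hr : r.length ≤ n := by omega
        rw [ih r (i + (k : Int) + 2) hr]
        have : (i + (k : Int) + 2) + (r.length : Int) = i + ((t.length + 1 : Nat) : Int) := by
          push_cast; omega
        rw [this]
      · -- rest = d :: r, not CRLF
        rename_i k d r hnot heq
        rw [heq] at hlen0 hfind0
        simp at hlen0
        have hr : r.length ≤ n := by omega
        have hL : (i + (k : Int) + 1) + (r.length : Int) = i + ((t.length + 1 : Nat) : Int) := by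
          push_cast; omega
        rcases pvSkipA_head (c :: t) d r (by rw [heq]) with hd | hd
        · subst hd
          rw [hfind0]
          simp only [pvFindEols, pvAsm, List.length_cons]
          rw [ih r (i + (k : Int) + 1) hr, hL]
          rfl
        · subst hd
          have hfr : pvFindEols ('\r' :: r) (i + (k : Int)) =
              (i + (k : Int), i + (k : Int) + 1, "\r") :: pvFindEols r (i + (k : Int) + 1) := by
            cases r with
            | nil => simp [pvFindEols]
            | cons e r' =>
              have he : e ≠ '\n' := by
                intro he
                exact hnot r' rfl (by rw [he])
              rw [pvFindEols.eq_def]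
              split
              · simp_all
              · rename_i heq2
                injection heq2 with g1 g2
                injection g2 with g3 g4
                exact absurd g3 he
              · simp_all
              · rename_i heq2
                injection heq2 with g1 g2
                rw [← g2]
              · rename_i hx heq2
                injection heq2 with g1 g2
                exact absurd g1.symm hx
          rw [hfind0, hfr]
          simp only [pvAsm, List.length_cons]
          rw [ih r (i + (k : Int) + 1) hr, hL]
          rfl

theorem build_line_index_spec' (text : String) :
    build_line_index text = build_line_index_alt text := by
  unfold build_line_index build_line_index_alt
  rw [pvFold_asm (pvFindEols text.toList 0) [] 0 (text.toList.length : Int)]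
  rw [pvMain text.toList.length text.toList 0 (le_refl _)]
  simp

-- ===== VERDICT (by name: the statement is the Claim_ definition above) =====
theorem build_line_index_spec : Claim_equal_build_line_index := by
  intro text _
  exact build_line_index_spec' text
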